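-- pv_equiv track=rewrite | github.com/tomwey2/cleankoda | src/agent/nodes/explainer.py | _enforce_char_budget
-- ===== SOURCE A (Python) =====
-- def _enforce_char_budget(lines: list[str], max_chars: int) -> tuple[list[str], int]:
--     """
--     Ensure output fits within max_chars by dropping oldest event lines first.
--     """
--     if len("\n".join(lines)) <= max_chars:
--         return lines, 0
--
--     trimmed = list(lines)
--     removed = 0
--     # Keep header at index 0 and remove from index 1 (oldest event first).
--     while len(trimmed) > 1 and len("\n".join(trimmed)) > max_chars:
--         trimmed.pop(1)
--         removed += 1
--
--     return trimmed, removed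
-- ===== SOURCE B (Python) =====
-- def _enforce_char_budget(lines: list[str], max_chars: int) -> tuple[list[str], int]:
--     """
--     Ensure output fits within max_chars by dropping oldest event lines first.
--     One pass: account lengths up front, then walk once to find how many
--     lines after the header must be dropped.
--     """
--     n = len(lines)
--     total = sum(len(s) for s in lines) + max(n - 1, 0)
--     if total <= max_chars:
--         return lines, 0
--     removed = 0
--     while removed < n - 1 and total > max_chars:
--         total -= len(lines[1 + removed]) + 1
--         removed += 1
--     return lines[:1] + lines[1 + removed:], removed
-- ===== Notes on version B (the rewrite author's own statement) =====
-- stated objective: faster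
-- what changed: Instead of re-joining the whole list and popping index 1 on every iteration, B computes the joined length once and walks the suffix once, subtracting len(line)+1 per dropped line to find how many to drop.
import Mathlib
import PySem

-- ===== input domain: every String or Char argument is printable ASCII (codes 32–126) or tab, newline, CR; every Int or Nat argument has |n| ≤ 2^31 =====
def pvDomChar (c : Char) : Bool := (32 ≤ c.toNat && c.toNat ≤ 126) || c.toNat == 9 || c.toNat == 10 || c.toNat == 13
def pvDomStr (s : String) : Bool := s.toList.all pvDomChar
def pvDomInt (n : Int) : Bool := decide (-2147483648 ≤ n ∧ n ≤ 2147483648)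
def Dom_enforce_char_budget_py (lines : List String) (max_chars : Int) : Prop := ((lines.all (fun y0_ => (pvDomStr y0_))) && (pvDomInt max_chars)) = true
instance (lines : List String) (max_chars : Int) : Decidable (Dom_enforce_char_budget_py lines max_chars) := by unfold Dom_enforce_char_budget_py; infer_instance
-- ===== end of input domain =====

-- B replaces A's quadratic re-join-and-pop loop by one-pass length accounting
-- (compute the joined length once, then subtract per dropped line); objective: faster.

-- ===== PORT A =====

-- len("\n".join(xs))
def pvJoinLen (xs : List String) : Int := PySem.Str.len (PySem.Str.join "\n" xs)

-- while len(trimmed) > 1 and len("\n".join(trimmed)) > max_chars: trimmed.pop(1); removed += 1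
-- (len(trimmed) > 1 means trimmed has shape a :: b :: rest, and trimmed.pop(1) leaves a :: rest)
def pvPopLoop : List String → Int → Int → List String × Int
  | a :: b :: rest, removed, max_chars =>
    if pvJoinLen (a :: b :: rest) > max_chars then
      pvPopLoop (a :: rest) (removed + 1) max_chars
    else (a :: b :: rest, removed)
  | trimmed, removed, _ => (trimmed, removed)

def enforce_char_budget_py (lines : List String) (max_chars : Int) : List String × Int :=
  if pvJoinLen lines ≤ max_chars then (lines, 0)
  else pvPopLoop lines 0 max_chars

-- ===== PORT B =====

-- the while loop of Source B over the not-yet-dropped suffix lines[1+removed:], returning removed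
def pvDropCount : List String → Int → Int → Nat
  | [], _, _ => 0
  | s :: rest, total, max_chars =>
    if total > max_chars then pvDropCount rest (total - (PySem.Str.len s + 1)) max_chars + 1
    else 0

def enforce_char_budget_py_alt (lines : List String) (max_chars : Int) : List String × Int :=
  let total := lines.foldl (fun acc s => acc + PySem.Str.len s) 0 + max ((lines.length : Int) - 1) 0
  if total ≤ max_chars then (lines, 0)
  else
    let removed := pvDropCount (lines.drop 1) total max_chars
    -- lines[:1] + lines[1+removed:], with both slice bounds nonnegative
    (lines.take 1 ++ lines.drop (1 + removed), (removed : Int))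

-- ===== PRECONDITION & SPEC =====
def Spec_enforce_char_budget_py (lines : List String) (max_chars : Int) (out : List String × Int) : Prop := out = enforce_char_budget_py_alt lines max_chars
instance (lines : List String) (max_chars : Int) (out : List String × Int) : Decidable (Spec_enforce_char_budget_py lines max_chars out) := by unfold Spec_enforce_char_budget_py; infer_instance

-- ===== CLAIM (what is proved, stated in full; the proofs are below) =====
def Claim_equal_enforce_char_budget_py : Prop := ∀ (lines : List String) (max_chars : Int), Dom_enforce_char_budget_py lines max_chars → Spec_enforce_char_budget_py lines max_chars (enforce_char_budget_py lines max_chars)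

-- ===== LEMMAS AND PROOFS =====

theorem pvJoinLen_nil : pvJoinLen [] = 0 := by decide

theorem pvJoinLen_singleton (a : String) : pvJoinLen [a] = PySem.Str.len a := by
  simp [pvJoinLen, PySem.Str.len, PySem.Str.toList_join, PySem.Chars.join_singleton]

theorem pvJoinLen_cons_cons (a b : String) (rest : List String) :
    pvJoinLen (a :: b :: rest) = PySem.Str.len a + 1 + pvJoinLen (b :: rest) := by
  simp [pvJoinLen, PySem.Str.len, PySem.Str.toList_join, PySem.Chars.join_cons_cons]
  ring

-- dropping the line at index 1 shortens the joined text by len(that line) + 1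
theorem pvJoinLen_pop (a b : String) (rest : List String) :
    pvJoinLen (a :: b :: rest) - (PySem.Str.len b + 1) = pvJoinLen (a :: rest) := by
  cases rest with
  | nil => simp [pvJoinLen_cons_cons, pvJoinLen_singleton]; omega
  | cons c rest' => simp [pvJoinLen_cons_cons]; ring

-- pvJoinLen as B's up-front accounting
theorem pvJoinLen_eq (xs : List String) :
    pvJoinLen xs = (xs.map PySem.Str.len).sum + max ((xs.length : Int) - 1) 0 := by
  induction xs with
  | nil => simp [pvJoinLen_nil]
  | cons a rest ih =>
    cases rest with
    | nil => simp [pvJoinLen_singleton]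
    | cons b rest' =>
      rw [pvJoinLen_cons_cons, ih]
      simp only [List.map, List.sum_cons, List.length_cons]
      push_cast
      omega

-- A's pop loop computes B's drop count
theorem pvPopLoop_eq (rest : List String) (a : String) (removed max_chars : Int) :
    pvPopLoop (a :: rest) removed max_chars =
      (a :: rest.drop (pvDropCount rest (pvJoinLen (a :: rest)) max_chars),
       removed + (pvDropCount rest (pvJoinLen (a :: rest)) max_chars : Int)) := by
  induction rest generalizing a removed with
  | nil => simp [pvPopLoop, pvDropCount]
  | cons b rest' ih =>
    by_cases h : pvJoinLen (a :: b :: rest') > max_chars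
    · rw [pvPopLoop, if_pos h]
      rw [ih a (removed + 1)]
      have hd : pvDropCount (b :: rest') (pvJoinLen (a :: b :: rest')) max_chars
          = pvDropCount rest' (pvJoinLen (a :: rest')) max_chars + 1 := by
        rw [pvDropCount, if_pos h, pvJoinLen_pop]
      rw [hd]
      simp only [List.drop_succ_cons, Prod.mk.injEq]
      exact ⟨trivial, by push_cast; ring⟩
    · rw [pvPopLoop, if_neg h]
      rw [pvDropCount, if_neg h]
      simp

-- ===== VERDICT (by name: the statement is the Claim_ definition above) =====
theorem enforce_char_budget_py_spec : Claim_equal_enforce_char_budget_py := by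
  intro lines max_chars _
  unfold Spec_enforce_char_budget_py enforce_char_budget_py enforce_char_budget_py_alt
  rw [PySem.List.foldl_add]
  rw [show (0 : Int) + (lines.map PySem.Str.len).sum + max ((lines.length : Int) - 1) 0
        = pvJoinLen lines by rw [pvJoinLen_eq]; ring]
  by_cases h : pvJoinLen lines ≤ max_chars
  · simp [h]
  · rw [if_neg h, if_neg h]
    cases lines with
    | nil => simp [pvPopLoop, pvDropCount]
    | cons a rest =>
      rw [pvPopLoop_eq]
      simp only [List.drop_succ_cons, List.take_succ_cons, List.take_zero,
        Prod.mk.injEq, zero_add, List.cons_append, List.nil_append]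
      rw [Nat.add_comm, List.drop_succ_cons]
      simp
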